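-- pv_equiv track=rewrite | github.com/jacey-h/Programming-language | Programmers_school/Level1/이상한문자만들기.py | solution
-- ===== SOURCE A (Python) =====
-- def solution(s):
--     answer = []
--     cnt = 0
--     for i in list(s):
--         if i == ' ':
--             cnt = 0
--             answer.append(' ')
--         elif cnt % 2 == 0:
--             answer.append(i.upper())
--             cnt += 1
--         else:
--             answer.append(i.lower())
--             cnt += 1
--
--     return ''.join(answer)
-- ===== SOURCE B (Python) =====
-- def solution(s):
--     words = s.split(' ')
--     return ' '.join(
--         ''.join(c.upper() if i % 2 == 0 else c.lower() for i, c in enumerate(w))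
--         for w in words
--     )
-- ===== Notes on version B (the rewrite author's own statement) =====
-- stated objective: simpler
-- what changed: Replaces A's single character loop with a global counter that resets at space characters by a split-on-space / per-word enumerate with index parity / join-with-space decomposition.
import Mathlib
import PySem

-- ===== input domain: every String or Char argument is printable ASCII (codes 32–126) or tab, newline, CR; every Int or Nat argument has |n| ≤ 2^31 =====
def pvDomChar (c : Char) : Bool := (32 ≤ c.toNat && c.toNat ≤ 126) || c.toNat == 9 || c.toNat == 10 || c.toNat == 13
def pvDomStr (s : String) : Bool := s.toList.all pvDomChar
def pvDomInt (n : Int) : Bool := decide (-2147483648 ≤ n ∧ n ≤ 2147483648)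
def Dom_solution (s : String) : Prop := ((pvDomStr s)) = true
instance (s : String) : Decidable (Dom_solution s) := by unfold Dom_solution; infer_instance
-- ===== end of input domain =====

-- B replaces A's global running counter with a split-on-space / per-word enumerate / join decomposition (same cost, simpler structure).

-- ===== PORT A =====
def solution (s : String) : String :=
  let r := s.toList.foldl (fun (st : List Char × Int) i =>
    if i = ' ' then (st.1 ++ [' '], 0)
    else if PySem.Int.mod st.2 2 = 0 then (st.1 ++ PySem.Chars.upper [i], st.2 + 1)
    else (st.1 ++ PySem.Chars.lower [i], st.2 + 1)) ([], 0)
  String.ofList r.1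

-- ===== PORT B =====
def solution_alt (s : String) : String :=
  let words := PySem.Chars.splitOn s.toList [' ']
  PySem.Str.join " " (words.map (fun w =>
    String.ofList ((PySem.List.enumerate w).map (fun ic =>
      if PySem.Int.mod ic.1 2 = 0 then PySem.Chars.upperChar ic.2
      else PySem.Chars.lowerChar ic.2))))

-- ===== PRECONDITION & SPEC =====
def Spec_solution (s : String) (out : String) : Prop := out = solution_alt s
instance (s : String) (out : String) : Decidable (Spec_solution s out) := by unfold Spec_solution; infer_instance

-- ===== CLAIM (what is proved, stated in full; the proofs are below) =====
def Claim_equal_solution : Prop := ∀ (s : String), Dom_solution s → Spec_solution s (solution s)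

-- ===== LEMMAS AND PROOFS =====

-- A's loop body, as a function of the running counter (proof-side view of port A)
def coreA : Int → List Char → List Char
  | _, [] => []
  | k, c :: cs =>
    if c = ' ' then ' ' :: coreA 0 cs
    else (if PySem.Int.mod k 2 = 0 then PySem.Chars.upperChar c
          else PySem.Chars.lowerChar c) :: coreA (k + 1) cs

-- B's per-word transform starting the enumeration at k (proof-side view of port B)
def tfB (k : Int) (w : List Char) : List Char :=
  (PySem.List.enumerate w k).map (fun ic =>
    if PySem.Int.mod ic.1 2 = 0 then PySem.Chars.upperChar ic.2
    else PySem.Chars.lowerChar ic.2)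

-- Python's split(' ') on a char list, structurally (proof-side)
def mySplit : List Char → List (List Char)
  | [] => [[]]
  | c :: cs =>
    if c = ' ' then [] :: mySplit cs
    else (c :: (mySplit cs).headI) :: (mySplit cs).tail

lemma mySplit_cons_eq (xs : List Char) :
    mySplit xs = (mySplit xs).headI :: (mySplit xs).tail := by
  cases xs with
  | nil => simp [mySplit]
  | cons c cs => simp only [mySplit]; split_ifs <;> simp

lemma tfB_nil (k : Int) : tfB k [] = [] := by simp [tfB, PySem.List.enumerate]

lemma tfB_cons (k : Int) (c : Char) (w : List Char) :
    tfB k (c :: w) =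
      (if PySem.Int.mod k 2 = 0 then PySem.Chars.upperChar c
       else PySem.Chars.lowerChar c) :: tfB (k + 1) w := by
  simp [tfB, PySem.List.enumerate]

lemma splitOn_go_spec (fuel : Nat) (l cur : List Char) (acc : List (List Char))
    (h : l.length < fuel) :
    PySem.Chars.splitOn.go [' '] fuel l cur acc =
      acc.reverse ++ (cur.reverse ++ (mySplit l).headI) :: (mySplit l).tail := by
  induction fuel generalizing l cur acc with
  | zero => omega
  | succ n ih =>
    cases l with
    | nil => simp [PySem.Chars.splitOn.go, mySplit]
    | cons c rest =>
      by_cases hc : c = ' '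
      · subst hc
        have hpre : List.isPrefixOf [' '] (' ' :: rest) = true := by
          simp [List.isPrefixOf]
        rw [PySem.Chars.splitOn.go]
        simp only [hpre, if_pos, List.length_cons, List.drop_succ_cons, List.length_nil,
          List.drop_zero]
        rw [ih rest [] (List.reverse cur :: acc) (by simpa using h)]
        simp [mySplit]
        exact (mySplit_cons_eq rest).symm
      · have hpre : List.isPrefixOf [' '] (c :: rest) = false := by
          simp only [List.isPrefixOf, Bool.and_true, beq_eq_false_iff_ne,
            ne_eq]
          exact fun hh => hc hh.symm
        rw [PySem.Chars.splitOn.go]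
        simp only [hpre, Bool.false_eq_true, if_false]
        rw [ih rest (c :: cur) acc (by simpa using h)]
        simp only [mySplit, if_neg hc]
        simp

lemma splitOn_eq_mySplit (l : List Char) :
    PySem.Chars.splitOn l [' '] = mySplit l := by
  unfold PySem.Chars.splitOn
  rw [splitOn_go_spec l.length.succ l [] [] (by omega)]
  simpa using (mySplit_cons_eq l).symm

lemma foldA_spec (xs : List Char) (acc : List Char) (k : Int) :
    (xs.foldl (fun (st : List Char × Int) i =>
      if i = ' ' then (st.1 ++ [' '], 0)
      else if PySem.Int.mod st.2 2 = 0 then (st.1 ++ PySem.Chars.upper [i], st.2 + 1)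
      else (st.1 ++ PySem.Chars.lower [i], st.2 + 1)) (acc, k)).1
      = acc ++ coreA k xs := by
  induction xs generalizing acc k with
  | nil => simp [coreA]
  | cons c cs ih =>
    by_cases hc : c = ' '
    · subst hc
      simp only [List.foldl_cons]
      rw [ih]
      simp [coreA]
    · by_cases hk : PySem.Int.mod k 2 = 0
      · simp only [List.foldl_cons, if_neg hc, if_pos hk]
        rw [ih]
        simp only [coreA, if_neg hc, if_pos hk, PySem.Chars.upper, List.map_cons, List.map_nil]
        simp
      · simp only [List.foldl_cons, if_neg hc, if_neg hk]
        rw [ih]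
        simp only [coreA, if_neg hc, if_neg hk, PySem.Chars.lower, List.map_cons, List.map_nil]
        simp

lemma coreA_spec (xs : List Char) (k : Int) :
    coreA k xs =
      tfB k ((mySplit xs).headI) ++
        (((mySplit xs).tail).map (fun w => ' ' :: tfB 0 w)).flatten := by
  induction xs generalizing k with
  | nil => simp [coreA, mySplit, tfB_nil]
  | cons c cs ih =>
    obtain ⟨hd, tl, hsp⟩ : ∃ hd tl, mySplit cs = hd :: tl := ⟨_, _, mySplit_cons_eq cs⟩
    by_cases hc : c = ' '
    · subst hc
      simp only [coreA, mySplit, if_pos]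
      rw [ih 0, hsp]
      simp [tfB]
    · simp only [coreA, mySplit, if_neg hc, hsp, List.headI_cons, List.tail_cons, tfB_cons]
      rw [ih (k + 1), hsp]
      simp

lemma intercalate_space (L : List Char) (Ls : List (List Char)) :
    List.intercalate [' '] (L :: Ls) = L ++ (Ls.map (fun w => ' ' :: w)).flatten := by
  induction Ls generalizing L with
  | nil => simp [List.intercalate]
  | cons M Ms ih =>
    rw [show List.intercalate [' '] (L :: M :: Ms) = L ++ [' '] ++ List.intercalate [' '] (M :: Ms) by
      simp [List.intercalate, List.intersperse]]
    rw [ih M]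
    simp

-- ===== VERDICT (by name: the statement is the Claim_ definition above) =====
theorem solution_spec : Claim_equal_solution := by
  intro s _
  unfold Spec_solution solution solution_alt
  apply String.toList_inj.mp
  simp only [PySem.Str.toList_join]
  rw [foldA_spec, splitOn_eq_mySplit]
  obtain ⟨hd, tl, hsp⟩ : ∃ hd tl, mySplit s.toList = hd :: tl := ⟨_, _, mySplit_cons_eq s.toList⟩
  rw [coreA_spec, hsp]
  simp only [List.map_cons, List.map_map, List.headI_cons, List.tail_cons, List.nil_append]
  have hmk : ∀ w : List Char,
      (String.ofList ((PySem.List.enumerate w).map (fun ic =>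
        if PySem.Int.mod ic.1 2 = 0 then PySem.Chars.upperChar ic.2
        else PySem.Chars.lowerChar ic.2))).toList = tfB 0 w := by
    intro w; rw [String.toList_ofList, tfB]
  rw [String.toList_ofList, hmk hd]
  unfold PySem.Chars.join
  rw [show " ".toList = [' '] from rfl]
  rw [show (String.toList ∘ fun w => String.ofList ((PySem.List.enumerate w).map (fun ic =>
        if PySem.Int.mod ic.1 2 = 0 then PySem.Chars.upperChar ic.2
        else PySem.Chars.lowerChar ic.2))) = tfB 0 from funext hmk]
  rw [intercalate_space]
  simp [List.map_map, Function.comp_def]
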